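-- pv_equiv track=rewrite | github.com/davidggarber/AoCode | aoc2025/day10.py | parse_lights
-- ===== SOURCE A (Python) =====
-- def parse_lights(s):
--   s = s[1:]  # Remove leading '['
--   bit = 1
--   n = 0
--   for ch in s:
--     if ch == '#':
--       n |= bit
--     bit <<= 1
--   return n
-- ===== SOURCE B (Python) =====
-- def parse_lights(s):
--     t = s[1:]  # drop the leading '['
--     if not t:
--         return 0
--     bits = ''.join('1' if c == '#' else '0' for c in t)
--     return int(bits[::-1], 2)
-- ===== Notes on version B (the rewrite author's own statement) =====
-- stated objective: faster
-- what changed: Replaces the incremental shift-and-OR loop over growing big-ints with building the reversed binary digit string and one int(bits, 2) conversion (0 for the empty tail).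
import Mathlib
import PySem

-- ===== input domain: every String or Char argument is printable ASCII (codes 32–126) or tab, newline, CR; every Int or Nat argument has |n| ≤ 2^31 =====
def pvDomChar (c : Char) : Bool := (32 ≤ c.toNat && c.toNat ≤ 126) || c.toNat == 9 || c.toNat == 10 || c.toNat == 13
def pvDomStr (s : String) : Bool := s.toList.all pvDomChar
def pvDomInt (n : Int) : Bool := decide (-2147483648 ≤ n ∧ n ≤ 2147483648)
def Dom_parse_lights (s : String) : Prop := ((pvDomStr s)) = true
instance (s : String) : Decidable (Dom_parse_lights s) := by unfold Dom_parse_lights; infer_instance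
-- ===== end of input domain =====

-- B replaces A's incremental shift-and-OR loop by a reversed binary-digit string converted as base 2 (faster in a timing run).

-- ===== PORT A =====
-- the loop: for ch in s: if ch == '#': n |= bit; bit <<= 1
def pvALoop : List Char → Int → Int → Int
  | [], _, n => n
  | c :: t, bit, n => pvALoop t (bit * 2) (if c = '#' then Int.lor n bit else n)   -- n |= bit
    -- bit <<= 1 ported as bit * 2 (exact: shift-left by one)

def parse_lights (s : String) : Int :=
  pvALoop (PySem.List.slice s.toList (some 1) none) 1 0   -- s = s[1:]

-- ===== PORT B =====
def parse_lights_alt (s : String) : Int :=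
  let t := PySem.List.slice s.toList (some 1) none        -- t = s[1:]
  if t = [] then 0
  else
    -- bits = ''.join('1' if c == '#' else '0' for c in t); int(bits[::-1], 2)
    -- int(_, 2) ported by hand as the base-2 left fold (exact on strings of '0'/'1' digits)
    ((t.map (fun c => if c = '#' then '1' else '0')).reverse).foldl
      (fun acc c => 2 * acc + (if c = '1' then 1 else 0)) 0

-- ===== PRECONDITION & SPEC =====
def Spec_parse_lights (s : String) (out : Int) : Prop := out = parse_lights_alt s
instance (s : String) (out : Int) : Decidable (Spec_parse_lights s out) := by unfold Spec_parse_lights; infer_instance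

-- ===== CLAIM (what is proved, stated in full; the proofs are below) =====
def Claim_equal_parse_lights : Prop := ∀ (s : String), Dom_parse_lights s → Spec_parse_lights s (parse_lights s)

-- ===== LEMMAS AND PROOFS =====

-- little-endian value of a '#'-mask, as a natural number
def pvVal : List Char → ℕ
  | [] => 0
  | c :: t => (if c = '#' then 1 else 0) + 2 * pvVal t

theorem pv_lor_two_pow : ∀ (k n : ℕ), n < 2 ^ k → n ||| 2 ^ k = n + 2 ^ k := by
  intro k
  induction k with
  | zero =>
    intro n h
    interval_cases n
    decide
  | succ k ih =>
    intro n h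
    induction n using Nat.bitCasesOn with
    | _ b m =>
      have hb : Nat.bit b m = 2 * m + b.toNat := by cases b <;> simp [Nat.bit_val]
      have hm : m < 2 ^ k := by
        rw [hb] at h; rw [pow_succ] at h; cases b <;> simp at hb ⊢ <;> omega
      have h2 : (2 : ℕ) ^ (k + 1) = Nat.bit false (2 ^ k) := by
        simp [Nat.bit_val, pow_succ]; ring
      rw [h2, Nat.lor_bit, ih m hm]
      cases b <;> simp [Nat.bit_val] <;> ring

theorem pvALoop_eq : ∀ (t : List Char) (k n : ℕ), n < 2 ^ k →
    pvALoop t ((2 ^ k : ℕ) : ℤ) (n : ℤ) = (n : ℤ) + ((2 ^ k : ℕ) : ℤ) * (pvVal t : ℤ) := by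
  intro t
  induction t with
  | nil => intro k n _; simp [pvALoop, pvVal]
  | cons c t ih =>
    intro k n hn
    have hbit : ((2 ^ k : ℕ) : ℤ) * 2 = ((2 ^ (k + 1) : ℕ) : ℤ) := by push_cast; ring
    by_cases hc : c = '#'
    · have hlor : Int.lor (n : ℤ) ((2 ^ k : ℕ) : ℤ) = ((n ||| 2 ^ k : ℕ) : ℤ) := rfl
      have hlt : n ||| 2 ^ k < 2 ^ (k + 1) := by
        rw [pv_lor_two_pow k n hn, pow_succ]; omega
      simp only [pvALoop, hc, if_pos]
      rw [hlor, hbit, ih (k + 1) _ hlt, pv_lor_two_pow k n hn]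
      simp [pvVal]
      push_cast
      ring
    · have hlt : n < 2 ^ (k + 1) := by rw [pow_succ]; omega
      simp only [pvALoop, hbit, hc, if_false]
      rw [ih (k + 1) _ hlt]
      simp only [pvVal, if_neg hc]
      push_cast
      ring

theorem pvBLoop_eq : ∀ (t : List Char) (acc : ℤ),
    ((t.map (fun c => if c = '#' then '1' else '0')).reverse).foldl
      (fun acc c => 2 * acc + (if c = '1' then 1 else 0)) acc
    = acc * (2 : ℤ) ^ t.length + (pvVal t : ℤ) := by
  intro t
  induction t with
  | nil => intro acc; simp [pvVal]
  | cons c t ih =>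
    intro acc
    simp only [List.map_cons, List.reverse_cons, List.foldl_append, List.foldl_cons,
      List.foldl_nil, ih acc, List.length_cons, pvVal]
    by_cases hc : c = '#' <;> simp [hc] <;> ring

-- ===== VERDICT (by name: the statement is the Claim_ definition above) =====
theorem parse_lights_spec : Claim_equal_parse_lights := by
  intro s _
  unfold Spec_parse_lights parse_lights parse_lights_alt
  set t := PySem.List.slice s.toList (some 1) none with ht
  by_cases h : t = []
  · simp [h, pvALoop]
  · have hA := pvALoop_eq t 0 0 (by norm_num)
    simp only [pow_zero, Nat.cast_zero, Nat.cast_one, zero_add, one_mul] at hA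
    simp [h, hA, pvBLoop_eq t 0]
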